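-- pv_equiv track=rewrite | github.com/Dockerel/Baekjoon | 6. 토 - DP, 비트마스킹/17297/a.py | go
-- ===== SOURCE A (Python) =====
-- dp = [0, 5, 13]
--
-- def go(curr, n):  # messi(n)에서 curr 찾기
--     # messi(n-1) + ' ' + messi(n-2)
--
--     if n == 2:
--         return "Messi Gimossi"[curr - 1]
--
--     # 1. 공백인 경우
--     if curr == dp[n - 1] + 1:
--         return " "
--     # 2. messi(n-1)에 포함되는 경우
--     if curr <= dp[n - 1]:
--         return go(curr, n - 1)
--     # 3. messi(n-2)에 포함되는 경우
--     return go(curr - dp[n - 1] - 1, n - 1)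
-- ===== SOURCE B (Python) =====
-- def go(curr, n):  # iterative: thread (curr, n) through a loop instead of the call stack
--     dp = [0, 5, 13]
--     while n > 2:
--         if curr == dp[n - 1] + 1:
--             return " "
--         if curr > dp[n - 1]:
--             curr -= dp[n - 1] + 1
--         n -= 1
--     return "Messi Gimossi"[curr - 1]
-- ===== Notes on version B (the rewrite author's own statement) =====
-- stated objective: alternative
-- what changed: Replaced A's recursion (curr, n threaded through the call stack) by an explicit while-loop that updates curr and n in place and returns the indexed character after the loop.
-- intended difference: For n <= 1 (where messi(n) is undefined) A's negative-index wraparound on dp returns ' ' on scattered curr values, while B reads 'Messi Gimossi'[curr-1] directly; on this unspecified corner B's direct reading is at least as intended as A's wraparound accident. — e.g. on go(1, 1): A returns " ", B returns "M"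
-- outside the precondition, e.g. on go(5, 4): A raises IndexError, B raises IndexError; on go(15, 1): A returns ' ', B raises IndexError; on go(14, 0): A returns ' ', B raises IndexError
import Mathlib
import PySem

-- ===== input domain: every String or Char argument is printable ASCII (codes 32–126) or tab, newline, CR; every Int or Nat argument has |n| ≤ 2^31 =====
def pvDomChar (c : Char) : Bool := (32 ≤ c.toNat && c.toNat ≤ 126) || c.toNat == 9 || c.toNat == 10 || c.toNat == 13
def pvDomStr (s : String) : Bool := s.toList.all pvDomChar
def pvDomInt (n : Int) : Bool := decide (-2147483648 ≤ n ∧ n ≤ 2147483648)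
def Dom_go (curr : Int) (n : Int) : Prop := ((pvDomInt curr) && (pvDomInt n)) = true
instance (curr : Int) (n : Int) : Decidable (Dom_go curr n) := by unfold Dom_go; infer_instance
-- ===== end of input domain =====

-- B re-implements A's recursion as an explicit while-loop threading (curr, n); same recurrence, different decomposition (alternative, not faster).

-- ===== PORT A =====
-- "Messi Gimossi"[curr - 1]; none (IndexError) only outside Pre_go, where "" stands in.
def goIndexA (curr : Int) : String :=
  match PySem.Str.pyGet? "Messi Gimossi" (curr - 1) with
  | some c => String.mk [c]
  | none => ""

-- A's recursion, fueled: the fuel given by `go` suffices on every input where Python A returns.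
def goAuxA : Nat → Int → Int → String
  | 0, _, _ => ""
  | fuel + 1, curr, n =>
    if n = 2 then goIndexA curr
    else
      match PySem.List.pyGet? [0, 5, 13] (n - 1) with
      | none => ""          -- dp[n-1] IndexError (outside Pre_go)
      | some d =>
        if curr = d + 1 then " "
        else if curr ≤ d then goAuxA fuel curr (n - 1)
        else goAuxA fuel (curr - d - 1) (n - 1)

def go (curr : Int) (n : Int) : String := goAuxA (n + 4).toNat curr n

-- ===== PORT B =====
def goIndexB (curr : Int) : String :=
  match PySem.Str.pyGet? "Messi Gimossi" (curr - 1) with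
  | some c => String.mk [c]
  | none => ""

-- one iteration of B's while-loop body; `some r` = early `return r`
def goStepB (st : Int × Int × Option String) : Int × Int × Option String :=
  match st with
  | (c, m, some r) => (c, m, some r)
  | (c, m, none) =>
    match PySem.List.pyGet? [0, 5, 13] (m - 1) with
    | none => (c, m, some "")   -- dp[m-1] IndexError (outside Pre_go)
    | some d =>
      if c = d + 1 then (c, m, some " ")
      else if c > d then (c - d - 1, m - 1, none)
      else (c, m - 1, none)

-- B: while n > 2 runs exactly (n-2).toNat times (n decreases by 1 each iteration)
def go_alt (curr : Int) (n : Int) : String :=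
  match (n - 2).toNat.fold (fun _ _ st => goStepB st) (curr, n, none) with
  | (c, _, none) => goIndexB c
  | (_, _, some r) => r

-- ===== PRECONDITION & SPEC =====
-- Pre_go excludes the inputs on which A raises IndexError (n ≥ 4, out-of-range curr, and most
-- n ≤ 1), and the four curr values per n ∈ {0,1} where A's dp wraparound returns ' ' but B's
-- direct indexing raises IndexError.
def Pre_go (curr : Int) (n : Int) : Prop :=
  (n = 2 ∧ -12 ≤ curr ∧ curr ≤ 13) ∨
  (n = 3 ∧ -12 ≤ curr ∧ curr ≤ 27) ∨
  (n = 1 ∧ (curr = 1 ∨ curr = 2 ∨ curr = 7 ∨ curr = 8)) ∨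
  (n = 0 ∧ (curr = 1 ∨ curr = 6 ∨ curr = 7)) ∨
  (n = -1 ∧ (curr = 1 ∨ curr = 6 ∨ curr = 7)) ∨
  (n = -2 ∧ curr = 1)
instance (curr : Int) (n : Int) : Decidable (Pre_go curr n) := by unfold Pre_go; infer_instance

def pvWitness_go : Int × Int := (5, 3)

-- For n ≤ 1 (where messi(n) is undefined) A's negative-index wraparound on dp makes it return
-- ' ' on scattered curr values; B instead reads 'Messi Gimossi'[curr-1] directly, the natural
-- n = 2 meaning, which is as defensible on this unspecified corner.
def D_go (curr : Int) (n : Int) : Prop := n ≤ 1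
instance (curr : Int) (n : Int) : Decidable (D_go curr n) := by unfold D_go; infer_instance

def Spec_go (curr : Int) (n : Int) (out : String) : Prop := ¬ D_go curr n → out = go_alt curr n
instance (curr : Int) (n : Int) (out : String) : Decidable (Spec_go curr n out) := by unfold Spec_go; infer_instance

def pvDiffWitness_go : Int × Int := (1, 1)
def pvDiffWitnessOut_go : String × String := (" ", "M")

-- ===== CLAIM (what is proved, stated in full; the proofs are below) =====
def Claim_unchanged_go : Prop := ∀ (curr : Int) (n : Int), Dom_go curr n → Pre_go curr n → Spec_go curr n (go curr n)
def Claim_changed_go : Prop := Dom_go (pvDiffWitness_go.1) (pvDiffWitness_go.2) ∧ Pre_go (pvDiffWitness_go.1) (pvDiffWitness_go.2) ∧ D_go (pvDiffWitness_go.1) (pvDiffWitness_go.2) ∧ go (pvDiffWitness_go.1) (pvDiffWitness_go.2) = pvDiffWitnessOut_go.1 ∧ go_alt (pvDiffWitness_go.1) (pvDiffWitness_go.2) = pvDiffWitnessOut_go.2 ∧ pvDiffWitnessOut_go.1 ≠ pvDiffWitnessOut_go.2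

-- ===== LEMMAS AND PROOFS =====

theorem go_eq_alt_two (curr : Int) : go curr 2 = go_alt curr 2 := by
  simp [go, go_alt, goAuxA, goIndexA, goIndexB]

theorem go_eq_alt_three (curr : Int) : go curr 3 = go_alt curr 3 := by
  have hidx : goIndexB = goIndexA := rfl
  have h1 : ((3 : Int) + 4).toNat = 7 := by decide
  have h2 : ((3 : Int) - 2).toNat = 1 := by decide
  have hd : PySem.List.pyGet? ([0, 5, 13] : List Int) ((3 : Int) - 1) = some 13 := by decide
  unfold go go_alt
  rw [h1, h2]
  show goAuxA 7 curr 3 = match goStepB (curr, 3, none) with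
    | (c, _, none) => goIndexB c
    | (_, _, some r) => r
  unfold goAuxA goStepB
  rw [hd, hidx]
  by_cases hc1 : curr = (13 : Int) + 1
  · simp [hc1]
  · by_cases hc2 : curr ≤ 13
    · have hng : ¬ curr > 13 := by omega
      have hc14 : ¬ curr = (14 : Int) := by omega
      simp [hc14, hc2, hng, goAuxA]
    · have hg : curr > 13 := by omega
      have hc14 : ¬ curr = (14 : Int) := by omega
      simp [hc14, hc2, hg, goAuxA]

-- ===== VERDICT (by name: the statement is the Claim_ definition above) =====
theorem go_spec : Claim_unchanged_go := by
  intro curr n _ hpre hD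
  unfold D_go at hD
  rcases hpre with ⟨h2, _⟩ | ⟨h3, _⟩ | ⟨h1, _⟩ | ⟨h0, _⟩ | ⟨hm1, _⟩ | ⟨hm2, _⟩
  · subst h2; exact go_eq_alt_two curr
  · subst h3; exact go_eq_alt_three curr
  all_goals (exfalso; omega)

theorem go_changed : Claim_changed_go := by unfold Claim_changed_go; decide
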